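-- pv_equiv track=rewrite | github.com/xer0times/SQLi-Query-Tampering | tamper.py | overlongutf8more
-- ===== SOURCE A (Python) =====
-- import string
--
-- def overlongutf8more(payload, **kwargs):
--     """
--     Converts all characters in a given payload to overlong UTF8 (not processing already encoded) (e.g. SELECT -> %C1%93%C1%85%C1%8C%C1%85%C1%83%C1%94)
--     Reference:
--         * https://www.acunetix.com/vulnerabilities/unicode-transformation-issues/
--         * https://www.thecodingforums.com/threads/newbie-question-about-character-encoding-what-does-0xc0-0x8a-have-in-common-with-0xe0-0x80-0x8a.170201/
--     >>> tamper('SELECT FIELD FROM TABLE WHERE 2>1')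
--     '%C1%93%C1%85%C1%8C%C1%85%C1%83%C1%94%C0%A0%C1%86%C1%89%C1%85%C1%8C%C1%84%C0%A0%C1%86%C1%92%C1%8F%C1%8D%C0%A0%C1%94%C1%81%C1%82%C1%8C%C1%85%C0%A0%C1%97%C1%88%C1%85%C1%92%C1%85%C0%A0%C0%B2%C0%BE%C0%B1'
--     """
--
--     retVal = payload
--
--     if payload:
--         retVal = ""
--         i = 0
--
--         while i < len(payload):
--             if payload[i] == '%' and (i < len(payload) - 2) and payload[i + 1:i + 2] in string.hexdigits and payload[i + 2:i + 3] in string.hexdigits: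
--                 retVal += payload[i:i + 3]
--                 i += 3
--             else:
--                 retVal += "%%%.2X%%%.2X" % (0xc0 + (ord(payload[i]) >> 6), 0x80 + (ord(payload[i]) & 0x3f))
--                 i += 1
--
--     return retVal
-- ===== SOURCE B (Python) =====
-- import re
--
-- def overlongutf8more(payload, **kwargs):
--     if not payload:
--         return payload
--
--     def repl(m):
--         s = m.group(0)
--         if len(s) == 3:
--             return s
--         c = ord(s)
--         return "%%%.2X%%%.2X" % (0xc0 + (c >> 6), 0x80 + (c & 0x3f))
--
--     return re.sub(r'%[0-9a-fA-F]{2}|.', repl, payload, flags=re.S)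
-- ===== Notes on version B (the rewrite author's own statement) =====
-- stated objective: idiomatic
-- what changed: A's manual while-loop with index arithmetic, slicing and substring-in-hexdigits tests is replaced by a single regex substitution re.sub(r'%[0-9a-fA-F]{2}|.', repl, payload, flags=re.S) whose alternation does the escape-vs-character dispatch.
import Mathlib
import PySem

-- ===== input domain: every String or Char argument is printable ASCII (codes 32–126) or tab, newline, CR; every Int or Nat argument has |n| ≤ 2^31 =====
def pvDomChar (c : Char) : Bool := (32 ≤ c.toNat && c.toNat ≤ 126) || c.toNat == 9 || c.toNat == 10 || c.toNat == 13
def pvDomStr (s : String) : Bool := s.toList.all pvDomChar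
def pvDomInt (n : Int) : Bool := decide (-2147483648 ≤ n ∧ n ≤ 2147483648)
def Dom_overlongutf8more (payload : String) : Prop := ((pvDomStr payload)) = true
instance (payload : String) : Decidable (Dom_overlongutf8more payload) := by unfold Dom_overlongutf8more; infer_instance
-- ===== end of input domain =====

-- B replaces A's manual index/slice while-loop by a single regex substitution
-- (re.sub(r'%[0-9a-fA-F]{2}|.', repl, payload, flags=re.S)); same cost, more idiomatic.

-- string.hexdigits
def pvHexdigits : List Char := "0123456789abcdefABCDEF".toList

-- shared by both Pythons:  "%%%.2X%%%.2X" % (0xc0 + (c >> 6), 0x80 + (c & 0x3f)).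
-- Exact for ord(c) ≤ 255 (both format arguments then lie in 0x80..0xC3: exactly two uppercase hex digits).
def pvHexDigitChar (n : Nat) : Char := "0123456789ABCDEF".toList.getD n ' '
def pvEnc (c : Char) : List Char :=
  ['%', pvHexDigitChar ((0xc0 + (c.toNat >>> 6)) / 16 % 16), pvHexDigitChar ((0xc0 + (c.toNat >>> 6)) % 16),
   '%', pvHexDigitChar ((0x80 + (c.toNat &&& 0x3f)) / 16 % 16), pvHexDigitChar ((0x80 + (c.toNat &&& 0x3f)) % 16)]

-- ===== PORT A =====
-- A's while-loop: state (retVal, i); Python's short-circuit 'and' chain becomes the ∧-condition in order.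
def overlongutf8moreLoop (payload : List Char) (retVal : List Char) (i : Nat) : List Char :=
  if h : i < payload.length then
    if payload[i] = '%' ∧ (i : Int) < (payload.length : Int) - 2
       ∧ PySem.Chars.isIn (PySem.List.slice payload (some ((i:Int)+1)) (some ((i:Int)+2))) pvHexdigits = true
       ∧ PySem.Chars.isIn (PySem.List.slice payload (some ((i:Int)+2)) (some ((i:Int)+3))) pvHexdigits = true
    then overlongutf8moreLoop payload (retVal ++ PySem.List.slice payload (some (i:Int)) (some ((i:Int)+3))) (i+3)
    else overlongutf8moreLoop payload (retVal ++ pvEnc payload[i]) (i+1)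
  else retVal
termination_by payload.length - i
decreasing_by all_goals omega

def overlongutf8more (payload : String) : String :=
  if payload.toList = [] then payload
  else String.ofList (overlongutf8moreLoop payload.toList [] 0)

-- ===== PORT B =====
-- hand port of Source B's  re.sub(r'%[0-9a-fA-F]{2}|.', repl, payload, flags=re.S)  with its repl:
-- at each position the alternation matches %XX (kept, len-3 match) or any single char (encoded);
-- exact because the pattern has no backtracking across positions.
def overlongutf8moreSub : List Char → List Char
  | '%' :: h1 :: h2 :: rest =>
      if pvHexdigits.contains h1 && pvHexdigits.contains h2
      then '%' :: h1 :: h2 :: overlongutf8moreSub rest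
      else pvEnc '%' ++ overlongutf8moreSub (h1 :: h2 :: rest)
  | c :: rest => pvEnc c ++ overlongutf8moreSub rest
  | [] => []

def overlongutf8more_alt (payload : String) : String :=
  if payload.toList = [] then payload
  else String.ofList (overlongutf8moreSub payload.toList)

-- ===== PRECONDITION & SPEC =====
def Spec_overlongutf8more (payload : String) (out : String) : Prop := out = overlongutf8more_alt payload
instance (payload : String) (out : String) : Decidable (Spec_overlongutf8more payload out) := by unfold Spec_overlongutf8more; infer_instance

-- ===== CLAIM (what is proved, stated in full; the proofs are below) =====
def Claim_equal_overlongutf8more : Prop := ∀ (payload : String), Dom_overlongutf8more payload → Spec_overlongutf8more payload (overlongutf8more payload)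

-- ===== LEMMAS AND PROOFS =====

lemma pv_isIn_singleton (c : Char) (l : List Char) :
    PySem.Chars.isIn [c] l = l.contains c := by
  by_cases hc : c ∈ l
  · simp [hc]
    rw [PySem.Chars.isIn_iff_infix]
    obtain ⟨s, t, rfl⟩ := List.append_of_mem hc
    exact ⟨s, t, by simp⟩
  · simp [hc]
    rw [PySem.Chars.isIn_eq_false_iff]
    intro h
    exact hc (h.subset (by simp))

lemma pv_sub_hex (h1 h2 : Char) (t : List Char) (ha : pvHexdigits.contains h1 = true)
    (hb : pvHexdigits.contains h2 = true) :
    overlongutf8moreSub ('%' :: h1 :: h2 :: t) = '%' :: h1 :: h2 :: overlongutf8moreSub t := by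
  rw [overlongutf8moreSub, ha, hb]; rfl

lemma pv_sub_nothex (h1 h2 : Char) (t : List Char)
    (hnot : (pvHexdigits.contains h1 && pvHexdigits.contains h2) = false) :
    overlongutf8moreSub ('%' :: h1 :: h2 :: t) = pvEnc '%' ++ overlongutf8moreSub (h1 :: h2 :: t) := by
  rw [overlongutf8moreSub, hnot]; rfl

lemma pv_sub_cons_ne (c : Char) (rest : List Char) (hc : c ≠ '%') :
    overlongutf8moreSub (c :: rest) = pvEnc c ++ overlongutf8moreSub rest := by
  rw [overlongutf8moreSub.eq_def]
  split
  · rename_i heq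
    injection heq with h _
    exact absurd h hc
  · rename_i c' rest' hx heq
    injection heq with e1 e2
    rw [e1, e2]
  · rename_i heq
    exact absurd heq (List.cons_ne_nil _ _)

lemma pv_slice_take (cs : List Char) (i n : Nat) :
    PySem.List.slice cs (some (i:Int)) (some ((i:Int)+(n:Nat))) = (cs.drop i).take n := by
  rw [show ((i:Int)+(n:Nat)) = ((i+n:Nat):Int) by push_cast; ring, PySem.List.slice_natCast]
  congr 1; omega

lemma pv_hex_slice (cs : List Char) (j : Nat) (hj : j < cs.length) :
    PySem.Chars.isIn (PySem.List.slice cs (some ((j:Int))) (some ((j:Int)+1))) pvHexdigits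
      = pvHexdigits.contains cs[j] := by
  rw [show ((j:Int)+1) = ((j:Int)+((1:Nat):Int)) by norm_num, pv_slice_take cs j 1,
      List.drop_eq_getElem_cons hj,
      show List.take 1 (cs[j] :: List.drop (j+1) cs) = [cs[j]] from rfl,
      pv_isIn_singleton]

lemma pv_loop_eq (cs : List Char) (i : Nat) (acc : List Char) :
    overlongutf8moreLoop cs acc i = acc ++ overlongutf8moreSub (cs.drop i) := by
  rw [overlongutf8moreLoop]
  by_cases h : i < cs.length
  · simp only [h, dite_true]
    have hdrop : cs.drop i = cs[i] :: cs.drop (i+1) := List.drop_eq_getElem_cons h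
    by_cases hcond : cs[i] = '%' ∧ (i : Int) < (cs.length : Int) - 2
       ∧ PySem.Chars.isIn (PySem.List.slice cs (some ((i:Int)+1)) (some ((i:Int)+2))) pvHexdigits = true
       ∧ PySem.Chars.isIn (PySem.List.slice cs (some ((i:Int)+2)) (some ((i:Int)+3))) pvHexdigits = true
    · rw [if_pos hcond]
      obtain ⟨hpc, hlen, hx1, hx2⟩ := hcond
      have h1 : i + 1 < cs.length := by omega
      have h2 : i + 2 < cs.length := by omega
      have hd1 : cs.drop (i+1) = cs[i+1] :: cs.drop (i+2) := List.drop_eq_getElem_cons h1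
      have hd2 : cs.drop (i+2) = cs[i+2] :: cs.drop (i+3) := List.drop_eq_getElem_cons h2
      have hx1' : pvHexdigits.contains cs[i+1] = true := by
        have e := pv_hex_slice cs (i+1) h1
        rw [show (((i+1:Nat)):Int) = (i:Int)+1 by push_cast; ring,
            show ((i:Int)+1+1) = (i:Int)+2 by ring] at e
        rw [e] at hx1; exact hx1
      have hx2' : pvHexdigits.contains cs[i+2] = true := by
        have e := pv_hex_slice cs (i+2) h2
        rw [show (((i+2:Nat)):Int) = (i:Int)+2 by push_cast; ring,
            show ((i:Int)+2+1) = (i:Int)+3 by ring] at e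
        rw [e] at hx2; exact hx2
      have hs3 : PySem.List.slice cs (some (i:Int)) (some ((i:Int)+3)) = [cs[i], cs[i+1], cs[i+2]] := by
        rw [show ((i:Int)+3) = ((i:Int)+((3:Nat):Int)) by norm_num, pv_slice_take cs i 3,
            hdrop, hd1, hd2]
        rfl
      rw [pv_loop_eq cs (i+3) _, hdrop, hd1, hd2, hpc,
          pv_sub_hex _ _ _ hx1' hx2', hs3, hpc]
      simp
    · rw [if_neg hcond]
      rw [pv_loop_eq cs (i+1) _, hdrop]
      by_cases hpc : cs[i] = '%'
      · -- a '%' that is NOT a valid %XX escape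
        rcases hd : cs.drop (i+1) with _ | ⟨h1, _ | ⟨h2, t⟩⟩
        · rw [hpc, show overlongutf8moreSub ['%'] = pvEnc '%' from rfl,
              show overlongutf8moreSub ([] : List Char) = [] from rfl]
          simp
        · rw [hpc, show overlongutf8moreSub ['%', h1] = pvEnc '%' ++ overlongutf8moreSub [h1] from rfl]
          simp
        · -- at least two chars follow, so i+2 < len and one of the hex tests failed
          have hlen2 : i + 2 < cs.length := by
            have hl : (cs.drop (i+1)).length = cs.length - (i+1) := List.length_drop ..
            rw [hd] at hl; simp at hl; omega
          have hd1 : cs.drop (i+1) = cs[i+1] :: cs.drop (i+2) := List.drop_eq_getElem_cons (by omega)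
          have hd2 : cs.drop (i+2) = cs[i+2] :: cs.drop (i+3) := List.drop_eq_getElem_cons hlen2
          rw [hd1] at hd
          injection hd with he1 hd'
          rw [hd2] at hd'
          injection hd' with he2 het
          -- he1 : cs[i+1] = h1, he2 : cs[i+2] = h2, het : cs.drop (i+3) = t
          have hff : pvHexdigits.contains h1 = true → pvHexdigits.contains h2 = true → False := by
            intro hca hcb
            exact hcond ⟨hpc, by omega, by
                have e := pv_hex_slice cs (i+1) (by omega)
                rw [show (((i+1:Nat)):Int) = (i:Int)+1 by push_cast; ring,
                    show ((i:Int)+1+1) = (i:Int)+2 by ring] at e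
                rw [e, he1]; exact hca, by
                have e := pv_hex_slice cs (i+2) hlen2
                rw [show (((i+2:Nat)):Int) = (i:Int)+2 by push_cast; ring,
                    show ((i:Int)+2+1) = (i:Int)+3 by ring] at e
                rw [e, he2]; exact hcb⟩
          have hnot : (pvHexdigits.contains h1 && pvHexdigits.contains h2) = false := by
            cases hA : pvHexdigits.contains h1 <;> cases hB : pvHexdigits.contains h2 <;> simp_all
          rw [hpc, pv_sub_nothex _ _ _ hnot]
          simp
      · rw [pv_sub_cons_ne _ _ hpc]
        simp
  · simp only [h, dite_false]
    rw [List.drop_eq_nil_of_le (by omega)]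
    simp [overlongutf8moreSub]
termination_by cs.length - i
decreasing_by all_goals omega

-- ===== VERDICT (by name: the statement is the Claim_ definition above) =====
theorem overlongutf8more_spec : Claim_equal_overlongutf8more := by
  intro payload _
  unfold Spec_overlongutf8more overlongutf8more overlongutf8more_alt
  by_cases hnil : payload.toList = []
  · simp [hnil]
  · simp only [hnil, if_false]
    rw [pv_loop_eq payload.toList 0 []]
    simp
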